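-- pv_equiv track=rewrite | github.com/mymarilyn/clickhouse-driver | clickhouse_driver/columns/nestedcolumn.py | get_columns_with_types
-- ===== SOURCE A (Python) =====
-- def get_columns_with_types(spec):
--     brackets = 0
--     prev_comma = 0
--     prev_space = 0
--
--     inner_spec = get_inner_spec(spec)
--     columns_with_types = []
--
--     for i, x in enumerate(inner_spec + ','):
--         if x == ',':
--             if brackets == 0:
--                 columns_with_types.append((
--                     inner_spec[prev_comma:prev_space].strip(),
--                     inner_spec[prev_space:i]
--                 ))
--                 prev_comma = i + 1
--         elif x == '(':
--             brackets += 1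
--         elif x == ')':
--             brackets -= 1
--         elif x == ' ':
--             if brackets == 0:
--                 prev_space = i + 1
--     return columns_with_types
--
-- def get_inner_spec(spec):
--     brackets = 0
--     offset = len('Nested')
--     i = offset
--     for i, ch in enumerate(spec[offset:], offset):
--         if ch == '(':
--             brackets += 1
--
--         elif ch == ')':
--             brackets -= 1
--
--         if brackets == 0:
--             break
--
--     return spec[offset + 1:i]
-- ===== SOURCE B (Python) =====
-- def get_inner_spec(spec):
--     brackets = 0
--     offset = len('Nested')
--     i = offset
--     for i, ch in enumerate(spec[offset:], offset):
--         if ch == '(':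
--             brackets += 1
--         elif ch == ')':
--             brackets -= 1
--         if brackets == 0:
--             break
--     return spec[offset + 1:i]
--
--
-- def get_columns_with_types(spec):
--     inner_spec = get_inner_spec(spec)
--     s = inner_spec + ','
--
--     # pass 1: positions of the depth-0 commas and depth-0 spaces
--     commas = []
--     spaces = []
--     depth = 0
--     for i, ch in enumerate(s):
--         if ch == '(':
--             depth += 1
--         elif ch == ')':
--             depth -= 1
--         elif depth == 0:
--             if ch == ',':
--                 commas.append(i)
--             elif ch == ' ':
--                 spaces.append(i)
--
--     # pass 2: pair each comma with the last depth-0 space before it (merge walk)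
--     columns_with_types = []
--     start = 0
--     last_space = 0
--     j = 0
--     for c in commas:
--         while j < len(spaces) and spaces[j] < c:
--             last_space = spaces[j] + 1
--             j += 1
--         columns_with_types.append((
--             inner_spec[start:last_space].strip(),
--             inner_spec[last_space:c]
--         ))
--         start = c + 1
--     return columns_with_types
-- ===== Notes on version B (the rewrite author's own statement) =====
-- stated objective: alternative
-- what changed: A's single fused stateful loop (brackets/prev_comma/prev_space mutated while appending) is replaced by two separate phases: one scan collecting the positions of depth-0 commas and depth-0 spaces, then a merge walk that pairs each comma with the last space position before it and builds the (name, type) slices.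
import Mathlib
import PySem

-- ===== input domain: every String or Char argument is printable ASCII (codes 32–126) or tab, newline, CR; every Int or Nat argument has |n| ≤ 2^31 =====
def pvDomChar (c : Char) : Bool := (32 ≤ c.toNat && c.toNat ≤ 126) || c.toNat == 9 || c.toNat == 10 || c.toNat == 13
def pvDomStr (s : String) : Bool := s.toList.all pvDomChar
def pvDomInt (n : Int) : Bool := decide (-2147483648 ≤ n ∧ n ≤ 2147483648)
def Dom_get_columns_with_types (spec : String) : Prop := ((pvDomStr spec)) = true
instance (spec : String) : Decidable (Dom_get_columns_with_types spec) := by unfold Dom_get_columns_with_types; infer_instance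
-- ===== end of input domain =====

-- B replaces A's fused stateful loop by two phases — collect the depth-0 comma/space
-- positions, then a merge walk pairing each comma with the last space before it —
-- same cost, different decomposition (objective: alternative).

-- ===== PORT A =====
-- shared helper: port of get_inner_spec (returns the inner spec as a char list);
-- the for-loop keeps the last index when it exhausts without break, 6 on an empty tail
def pvInnerLoop : List Char → Nat → Int → Nat
  | [], i, _ => i
  | ch :: rest, i, b =>
    let b' := if ch = '(' then b + 1 else if ch = ')' then b - 1 else b
    if b' = 0 then i
    else match rest with
      | [] => i
      | _ :: _ => pvInnerLoop rest (i + 1) b'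

def pvInnerSpec (spec : String) : List Char :=
  let i := pvInnerLoop (PySem.List.slice spec.toList (some 6) none) 6 0
  PySem.List.slice spec.toList (some 7) (some (i : Int))

-- A's single loop over inner_spec + ',' with state (i, brackets, prev_comma, prev_space, acc)
def pvALoop (inner : List Char) : List Char → Nat → Int → Nat → Nat → List (String × String) → List (String × String)
  | [], _, _, _, _, acc => acc
  | ch :: rest, i, b, pc, ps, acc =>
    if ch = ',' then
      if b = 0 then
        pvALoop inner rest (i + 1) b (i + 1) ps
          (acc ++ [(String.ofList (PySem.Chars.strip (PySem.List.slice inner (some (pc : Int)) (some (ps : Int)))),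
                    String.ofList (PySem.List.slice inner (some (ps : Int)) (some (i : Int))))])
      else pvALoop inner rest (i + 1) b pc ps acc
    else if ch = '(' then pvALoop inner rest (i + 1) (b + 1) pc ps acc
    else if ch = ')' then pvALoop inner rest (i + 1) (b - 1) pc ps acc
    else if ch = ' ' then
      if b = 0 then pvALoop inner rest (i + 1) b pc (i + 1) acc
      else pvALoop inner rest (i + 1) b pc ps acc
    else pvALoop inner rest (i + 1) b pc ps acc

def get_columns_with_types (spec : String) : List (String × String) :=
  let inner := pvInnerSpec spec
  pvALoop inner (inner ++ [',']) 0 0 0 0 []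

-- ===== PORT B =====
-- pass 1: positions of depth-0 commas and depth-0 spaces in inner_spec + ','
def pvScan : List Char → Nat → Int → List Nat × List Nat
  | [], _, _ => ([], [])
  | ch :: rest, i, d =>
    if ch = '(' then pvScan rest (i + 1) (d + 1)
    else if ch = ')' then pvScan rest (i + 1) (d - 1)
    else if d = 0 then
      if ch = ',' then
        let p := pvScan rest (i + 1) d
        (i :: p.1, p.2)
      else if ch = ' ' then
        let p := pvScan rest (i + 1) d
        (p.1, i :: p.2)
      else pvScan rest (i + 1) d
    else pvScan rest (i + 1) d

-- the inner while: consume the space positions below c, tracking last_space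
def pvAdvance : List Nat → Nat → Nat → List Nat × Nat
  | [], _, ls => ([], ls)
  | s :: ss, c, ls => if s < c then pvAdvance ss c (s + 1) else (s :: ss, ls)

-- pass 2: merge walk over the comma positions
def pvBLoop (inner : List Char) : List Nat → List Nat → Nat → Nat → List (String × String)
  | [], _, _, _ => []
  | c :: cs, spaces, start, ls =>
    let p := pvAdvance spaces c ls
    (String.ofList (PySem.Chars.strip (PySem.List.slice inner (some (start : Int)) (some (p.2 : Int)))),
     String.ofList (PySem.List.slice inner (some (p.2 : Int)) (some (c : Int))))
      :: pvBLoop inner cs p.1 (c + 1) p.2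

def get_columns_with_types_alt (spec : String) : List (String × String) :=
  let inner := pvInnerSpec spec
  let p := pvScan (inner ++ [',']) 0 0
  pvBLoop inner p.1 p.2 0 0

-- ===== PRECONDITION & SPEC =====
def Spec_get_columns_with_types (spec : String) (out : List (String × String)) : Prop := out = get_columns_with_types_alt spec
instance (spec : String) (out : List (String × String)) : Decidable (Spec_get_columns_with_types spec out) := by unfold Spec_get_columns_with_types; infer_instance

-- ===== CLAIM (what is proved, stated in full; the proofs are below) =====
def Claim_equal_get_columns_with_types : Prop := ∀ (spec : String), Dom_get_columns_with_types spec → Spec_get_columns_with_types spec (get_columns_with_types spec)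

-- ===== LEMMAS AND PROOFS =====

-- every position pvScan reports is ≥ the starting index
theorem pvScan_ge (l : List Char) : ∀ (i : Nat) (d : Int),
    (∀ j ∈ (pvScan l i d).1, i ≤ j) ∧ (∀ j ∈ (pvScan l i d).2, i ≤ j) := by
  induction l with
  | nil => intro i d; simp [pvScan]
  | cons ch rest ih =>
    intro i d
    have h1 := ih (i + 1) (d + 1)
    have h2 := ih (i + 1) (d - 1)
    have h3 := ih (i + 1) d
    simp only [pvScan]
    split_ifs <;>
      refine ⟨fun j hj => ?_, fun j hj => ?_⟩ <;>
      simp only [List.mem_cons] at hj <;>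
      first
      | (have := h1.1 j hj; omega)
      | (have := h1.2 j hj; omega)
      | (have := h2.1 j hj; omega)
      | (have := h2.2 j hj; omega)
      | (have := h3.1 j hj; omega)
      | (have := h3.2 j hj; omega)
      | (rcases hj with rfl | hj
         · omega
         · first
           | (have := h3.1 j hj; omega)
           | (have := h3.2 j hj; omega))

theorem pvAdvance_ge (ss : List Nat) (c ls : Nat) (h : ∀ j ∈ ss, c ≤ j) :
    pvAdvance ss c ls = (ss, ls) := by
  cases ss with
  | nil => rfl
  | cons s ss' =>
    have : ¬ s < c := by have := h s (by simp); omega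
    simp [pvAdvance, this]

theorem pvBLoop_cons_space (inner : List Char) (cs ss : List Nat) (i start ls : Nat)
    (h : ∀ c ∈ cs, i < c) :
    pvBLoop inner cs (i :: ss) start ls = pvBLoop inner cs ss start (i + 1) := by
  cases cs with
  | nil => rfl
  | cons c cs' =>
    have hc : i < c := h c (by simp)
    simp [pvBLoop, pvAdvance, hc]

theorem pvMain (inner : List Char) (l : List Char) : ∀ (i : Nat) (b : Int) (pc ps : Nat)
    (acc : List (String × String)),
    pvALoop inner l i b pc ps acc
      = acc ++ pvBLoop inner (pvScan l i b).1 (pvScan l i b).2 pc ps := by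
  induction l with
  | nil => intro i b pc ps acc; simp [pvALoop, pvScan, pvBLoop]
  | cons ch rest ih =>
    intro i b pc ps acc
    by_cases hcomma : ch = ','
    · subst hcomma
      by_cases hb : b = 0
      · subst hb
        have hadv : pvAdvance (pvScan rest (i + 1) 0).2 i ps = ((pvScan rest (i + 1) 0).2, ps) := by
          apply pvAdvance_ge
          intro j hj
          have := (pvScan_ge rest (i + 1) 0).2 j hj
          omega
        simp [pvALoop, pvScan, pvBLoop, hadv, ih]
      · simp [pvALoop, pvScan, hb, ih]
    · by_cases hopen : ch = '('
      · subst hopen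
        simp [pvALoop, pvScan, hcomma, ih]
      · by_cases hclose : ch = ')'
        · subst hclose
          simp [pvALoop, pvScan, hcomma, ih]
        · by_cases hspace : ch = ' '
          · subst hspace
            by_cases hb : b = 0
            · subst hb
              have hbs := pvBLoop_cons_space inner (pvScan rest (i + 1) 0).1
                (pvScan rest (i + 1) 0).2 i pc ps
                (fun c hc => by have := (pvScan_ge rest (i + 1) 0).1 c hc; omega)
              simp [pvALoop, pvScan, hcomma, hbs, ih]
            · simp [pvALoop, pvScan, hcomma, hb, ih]
          · by_cases hb : b = 0 <;>
              simp [pvALoop, pvScan, hcomma, hopen, hclose, hspace, hb, ih]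

-- ===== VERDICT (by name: the statement is the Claim_ definition above) =====
theorem get_columns_with_types_spec : Claim_equal_get_columns_with_types := by
  intro spec _
  unfold Spec_get_columns_with_types get_columns_with_types get_columns_with_types_alt
  rw [pvMain]
  simp
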